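-- pv_equiv track=rewrite | github.com/kevingreencode/visualizer | v.py | categorize_nodes
-- ===== SOURCE A (Python) =====
-- def categorize_nodes(links):
--     """categorizes nodes into core, aggregation, ToR, and hosts for coloring"""
--     core_nodes, agg_nodes, tor_nodes, host_nodes = set(), set(), set(), set()
--
--     for node1, node2, _ in links:
--         for node in (node1, node2):
--             if node.startswith("c"):
--                 core_nodes.add(node)
--             elif node.startswith("a"):
--                 agg_nodes.add(node)
--             elif node.startswith("t"):
--                 tor_nodes.add(node)
--             elif node.startswith("h"):
--                 host_nodes.add(node)
--
--     return core_nodes, agg_nodes, tor_nodes, host_nodes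
-- ===== SOURCE B (Python) =====
-- def categorize_nodes(links):
--     """categorizes nodes into core, aggregation, ToR, and hosts for coloring"""
--     nodes = {n for node1, node2, _ in links for n in (node1, node2)}
--     core_nodes = {n for n in nodes if n.startswith("c")}
--     agg_nodes = {n for n in nodes if n.startswith("a")}
--     tor_nodes = {n for n in nodes if n.startswith("t")}
--     host_nodes = {n for n in nodes if n.startswith("h")}
--     return core_nodes, agg_nodes, tor_nodes, host_nodes
-- ===== Notes on version B (the rewrite author's own statement) =====
-- stated objective: simpler
-- what changed: Instead of one elif-dispatch loop maintaining four sets, B gathers all node names into one set and then derives each category as an independent filtering comprehension over that set.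
import Mathlib
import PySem

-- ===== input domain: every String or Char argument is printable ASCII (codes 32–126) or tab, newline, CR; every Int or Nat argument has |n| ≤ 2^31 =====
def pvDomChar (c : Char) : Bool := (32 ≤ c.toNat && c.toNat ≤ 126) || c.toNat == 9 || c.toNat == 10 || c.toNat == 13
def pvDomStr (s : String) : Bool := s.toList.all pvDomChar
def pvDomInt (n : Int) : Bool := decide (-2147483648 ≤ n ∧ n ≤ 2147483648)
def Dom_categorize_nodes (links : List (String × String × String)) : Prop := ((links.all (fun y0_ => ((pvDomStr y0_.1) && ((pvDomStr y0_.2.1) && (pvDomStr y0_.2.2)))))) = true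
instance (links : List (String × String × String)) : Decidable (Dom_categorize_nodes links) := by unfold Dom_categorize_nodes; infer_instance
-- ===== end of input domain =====

-- B replaces A's one elif-dispatch loop over four sets by a gather-all-nodes pass plus four
-- independent filters over that set (objective: simpler decomposition, same cost).


-- ===== PORT A =====
-- the body of A's inner loop: the if/elif dispatch on one node
def catStep (acc : List String × List String × List String × List String) (node : String) :
    List String × List String × List String × List String :=
  if PySem.Str.startswith node "c" then (PySem.Set.add acc.1 node, acc.2.1, acc.2.2.1, acc.2.2.2)
  else if PySem.Str.startswith node "a" then (acc.1, PySem.Set.add acc.2.1 node, acc.2.2.1, acc.2.2.2)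
  else if PySem.Str.startswith node "t" then (acc.1, acc.2.1, PySem.Set.add acc.2.2.1 node, acc.2.2.2)
  else if PySem.Str.startswith node "h" then (acc.1, acc.2.1, acc.2.2.1, PySem.Set.add acc.2.2.2 node)
  else acc

def categorize_nodes (links : List (String × String × String)) :
    List String × List String × List String × List String :=
  links.foldl (fun acc t => catStep (catStep acc t.1) t.2.1)
    (PySem.Set.empty, PySem.Set.empty, PySem.Set.empty, PySem.Set.empty)

-- ===== PORT B =====
def categorize_nodes_alt (links : List (String × String × String)) :
    List String × List String × List String × List String :=
  let nodes : PySem.Set String := PySem.Set.ofList (links.flatMap (fun t => [t.1, t.2.1]))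
  (nodes.filter (fun n => PySem.Str.startswith n "c"),
   nodes.filter (fun n => PySem.Str.startswith n "a"),
   nodes.filter (fun n => PySem.Str.startswith n "t"),
   nodes.filter (fun n => PySem.Str.startswith n "h"))

-- ===== PRECONDITION & SPEC =====
def Spec_categorize_nodes (links : List (String × String × String)) (out : List String × List String × List String × List String) : Prop := out = categorize_nodes_alt links
instance (links : List (String × String × String)) (out : List String × List String × List String × List String) : Decidable (Spec_categorize_nodes links out) := by unfold Spec_categorize_nodes; infer_instance

-- ===== CLAIM (what is proved, stated in full; the proofs are below) =====
def Claim_equal_categorize_nodes : Prop := ∀ (links : List (String × String × String)), Dom_categorize_nodes links → Spec_categorize_nodes links (categorize_nodes links)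

-- ===== LEMMAS AND PROOFS =====

-- two distinct single-character prefixes of the same string are impossible
theorem sw_excl (s : String) (a b : Char) (hab : a ≠ b)
    (h : PySem.Chars.startswith s.toList [a] = true) :
    PySem.Chars.startswith s.toList [b] = false := by
  by_contra hb
  rw [Bool.not_eq_false] at hb
  rw [PySem.Chars.startswith_iff] at h hb
  rcases h with ⟨t1, h1⟩
  rcases hb with ⟨t2, h2⟩
  have h3 : a :: t1 = b :: t2 := by
    simpa using h1.trans h2.symm
  exact hab (List.cons.injEq .. ▸ h3 |>.1)

-- filtering through Set.add
theorem filter_add (S : List String) (x : String) (p : String → Bool) :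
    List.filter p (PySem.Set.add S x) =
      if p x then PySem.Set.add (List.filter p S) x else List.filter p S := by
  by_cases hm : x ∈ S
  · rw [PySem.Set.add_of_mem hm]
    by_cases hp : p x
    · rw [if_pos hp, PySem.Set.add_of_mem (List.mem_filter.mpr ⟨hm, hp⟩)]
    · rw [if_neg hp]
  · rw [PySem.Set.add_of_not_mem hm, List.filter_append]
    by_cases hp : p x
    · rw [if_pos hp, PySem.Set.add_of_not_mem (fun hmem => hm (List.mem_filter.mp hmem).1)]
      simp [hp]
    · rw [if_neg hp]
      simp [hp]

-- one dispatch step on the four filtered views = filtering the augmented set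
theorem catStep_filters (S : List String) (x : String) :
    catStep (S.filter (fun n => PySem.Str.startswith n "c"),
             S.filter (fun n => PySem.Str.startswith n "a"),
             S.filter (fun n => PySem.Str.startswith n "t"),
             S.filter (fun n => PySem.Str.startswith n "h")) x =
      ((PySem.Set.add S x).filter (fun n => PySem.Str.startswith n "c"),
       (PySem.Set.add S x).filter (fun n => PySem.Str.startswith n "a"),
       (PySem.Set.add S x).filter (fun n => PySem.Str.startswith n "t"),
       (PySem.Set.add S x).filter (fun n => PySem.Str.startswith n "h")) := by
  unfold catStep
  simp only [PySem.Str.startswith_eq, filter_add]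
  by_cases hc : PySem.Chars.startswith x.toList ['c'] = true
  · simp [hc, sw_excl x 'c' 'a' (by decide) hc, sw_excl x 'c' 't' (by decide) hc,
      sw_excl x 'c' 'h' (by decide) hc]
  · by_cases ha : PySem.Chars.startswith x.toList ['a'] = true
    · simp [hc, ha, sw_excl x 'a' 't' (by decide) ha, sw_excl x 'a' 'h' (by decide) ha]
    · by_cases ht : PySem.Chars.startswith x.toList ['t'] = true
      · simp [hc, ha, ht, sw_excl x 't' 'h' (by decide) ht]
      · by_cases hh : PySem.Chars.startswith x.toList ['h'] = true
        · simp [hc, ha, ht, hh]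
        · simp [hc, ha, ht, hh]

-- folding the dispatch step over a node list = filtering the updated set
theorem foldl_catStep (xs : List String) (S : List String) :
    xs.foldl catStep
        (S.filter (fun n => PySem.Str.startswith n "c"),
         S.filter (fun n => PySem.Str.startswith n "a"),
         S.filter (fun n => PySem.Str.startswith n "t"),
         S.filter (fun n => PySem.Str.startswith n "h")) =
      ((PySem.Set.update S xs).filter (fun n => PySem.Str.startswith n "c"),
       (PySem.Set.update S xs).filter (fun n => PySem.Str.startswith n "a"),
       (PySem.Set.update S xs).filter (fun n => PySem.Str.startswith n "t"),
       (PySem.Set.update S xs).filter (fun n => PySem.Str.startswith n "h")) := by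
  induction xs generalizing S with
  | nil => simp [PySem.Set.update]
  | cons x xs ih =>
      rw [List.foldl_cons, catStep_filters, ih]
      simp [PySem.Set.update]

-- A's paired fold over links = a fold of catStep over the flattened node list
theorem fold_links_eq (links : List (String × String × String))
    (acc : List String × List String × List String × List String) :
    links.foldl (fun acc t => catStep (catStep acc t.1) t.2.1) acc =
      (links.flatMap (fun t => [t.1, t.2.1])).foldl catStep acc := by
  induction links generalizing acc with
  | nil => rfl
  | cons t l ih => simp [List.foldl_cons, ih]

-- ===== VERDICT (by name: the statement is the Claim_ definition above) =====
theorem categorize_nodes_spec : Claim_equal_categorize_nodes := by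
  intro links _
  show categorize_nodes links = categorize_nodes_alt links
  unfold categorize_nodes categorize_nodes_alt
  rw [fold_links_eq]
  have h := foldl_catStep (links.flatMap (fun t => [t.1, t.2.1])) []
  simp only [List.filter_nil] at h
  simp only [PySem.Set.empty]
  rw [h]
  simp [PySem.Set.update, PySem.Set.ofList_eq_foldl]
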